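-- pv_equiv track=rewrite | github.com/aadityc91/TechChunkBench | src/chunkers/base.py | join_preserving_paragraphs
-- ===== SOURCE A (Python) =====
-- from typing import List, Set, Tuple
--
-- def join_preserving_paragraphs(sentences: list, para_ends: Set[int]) -> str:
--     """Join sentences, using \\n\\n at paragraph boundaries, space otherwise."""
--     parts = []
--     for i, sent in enumerate(sentences):
--         parts.append(sent)
--         if i < len(sentences) - 1:
--             if i in para_ends:
--                 parts.append("\n\n")
--             else:
--                 parts.append(" ")
--     return "".join(parts)
-- ===== SOURCE B (Python) =====
-- def join_preserving_paragraphs(sentences: list, para_ends) -> str: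
--     """Join sentences, using \n\n at paragraph boundaries, space otherwise."""
--     groups = []
--     current = []
--     n = len(sentences)
--     for i, sent in enumerate(sentences):
--         current.append(sent)
--         if i < n - 1 and i in para_ends:
--             groups.append(current)
--             current = []
--     if current:
--         groups.append(current)
--     return "\n\n".join(" ".join(g) for g in groups)
-- ===== Notes on version B (the rewrite author's own statement) =====
-- stated objective: alternative
-- what changed: Instead of interleaving separator strings into one flat parts list, B first partitions the sentences into paragraph groups (closing a group whenever a non-final index is in para_ends) and then joins each group with spaces and the groups with blank lines.
import Mathlib
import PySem

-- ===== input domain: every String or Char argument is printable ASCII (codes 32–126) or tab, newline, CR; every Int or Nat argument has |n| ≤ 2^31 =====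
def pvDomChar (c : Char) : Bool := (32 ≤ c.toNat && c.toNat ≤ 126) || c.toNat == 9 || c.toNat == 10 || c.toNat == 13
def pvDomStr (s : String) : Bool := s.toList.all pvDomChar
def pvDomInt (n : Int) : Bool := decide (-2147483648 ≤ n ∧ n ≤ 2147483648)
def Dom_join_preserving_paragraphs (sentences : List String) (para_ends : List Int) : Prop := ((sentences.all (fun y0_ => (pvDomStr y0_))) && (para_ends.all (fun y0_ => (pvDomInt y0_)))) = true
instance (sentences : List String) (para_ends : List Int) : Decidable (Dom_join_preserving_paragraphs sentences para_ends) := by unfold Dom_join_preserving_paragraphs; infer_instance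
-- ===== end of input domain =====

-- B groups the sentences into paragraphs first and then nests two joins, instead of
-- A's single pass interleaving separator strings into one flat parts list (objective: alternative decomposition).

-- ===== PORT A =====
def join_preserving_paragraphs (sentences : List String) (para_ends : List Int) : String :=
  PySem.Str.join "" ((PySem.List.enumerate sentences).foldl (fun parts p =>
    let parts1 := parts ++ [p.2]
    if p.1 < (sentences.length : Int) - 1 then
      if para_ends.contains p.1 then parts1 ++ ["\n\n"] else parts1 ++ [" "]
    else parts1) [])

-- ===== PORT B =====
def join_preserving_paragraphs_alt (sentences : List String) (para_ends : List Int) : String :=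
  let gc := (PySem.List.enumerate sentences).foldl
    (fun (gc : List (List String) × List String) p =>
      let current := gc.2 ++ [p.2]
      if p.1 < (sentences.length : Int) - 1 ∧ para_ends.contains p.1 = true then
        (gc.1 ++ [current], ([] : List String))
      else (gc.1, current)) ([], [])
  let groups := if gc.2 ≠ [] then gc.1 ++ [gc.2] else gc.1
  PySem.Str.join "\n\n" (groups.map (fun g => PySem.Str.join " " g))

-- ===== PRECONDITION & SPEC =====
def Spec_join_preserving_paragraphs (sentences : List String) (para_ends : List Int) (out : String) : Prop := out = join_preserving_paragraphs_alt sentences para_ends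
instance (sentences : List String) (para_ends : List Int) (out : String) : Decidable (Spec_join_preserving_paragraphs sentences para_ends out) := by unfold Spec_join_preserving_paragraphs; infer_instance

-- ===== CLAIM (what is proved, stated in full; the proofs are below) =====
def Claim_equal_join_preserving_paragraphs : Prop := ∀ (sentences : List String) (para_ends : List Int), Dom_join_preserving_paragraphs sentences para_ends → Spec_join_preserving_paragraphs sentences para_ends (join_preserving_paragraphs sentences para_ends)

-- ===== LEMMAS AND PROOFS =====

-- The common reference value: the joined text of the suffix `l` of the sentence list,
-- whose head sits at index `i`; a separator follows every element except the last one.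
def pvSpec (pe : List Int) : Int → List String → List Char
  | _, [] => []
  | _, [s] => s.toList
  | i, s :: r => s.toList ++ (if pe.contains i then ['\n', '\n'] else [' ']) ++ pvSpec pe (i + 1) r

-- join with the empty separator is concatenation
theorem pvJoin_nil_eq_flatten (l : List (List Char)) : PySem.Chars.join [] l = l.flatten := by
  induction l with
  | nil => simp [PySem.Chars.join_nil]
  | cons a t ih =>
    cases t with
    | nil => simp [PySem.Chars.join_singleton]
    | cons b r => rw [PySem.Chars.join_cons_cons]; simp_all

-- join of a list with a nonempty tail
theorem pvJoin_cons_ne (sep x : List Char) (rest : List (List Char)) (h : rest ≠ []) :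
    PySem.Chars.join sep (x :: rest) = x ++ sep ++ PySem.Chars.join sep rest := by
  cases rest with
  | nil => exact absurd rfl h
  | cons b r => exact PySem.Chars.join_cons_cons sep x b r

-- join of a list with one element appended at the back
theorem pvJoin_append_singleton (sep y : List Char) (xs : List (List Char)) (h : xs ≠ []) :
    PySem.Chars.join sep (xs ++ [y]) = PySem.Chars.join sep xs ++ sep ++ y := by
  induction xs with
  | nil => exact absurd rfl h
  | cons a t ih =>
    cases t with
    | nil => simp [PySem.Chars.join_singleton, PySem.Chars.join_cons_cons]
    | cons b r =>
      rw [List.cons_append, pvJoin_cons_ne sep a ((b :: r) ++ [y]) (by simp),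
          PySem.Chars.join_cons_cons, ih (by simp)]
      simp

-- ===== A-side =====

def pvPieceA (pe : List Int) (n : Int) (p : Int × String) : List String :=
  p.2 :: (if p.1 < n - 1 then (if pe.contains p.1 then ["\n\n"] else [" "]) else [])

theorem pvA_fold_eq_flatMap (pe : List Int) (n : Int) (l : List (Int × String)) :
    List.foldl (fun parts p =>
      let parts1 := parts ++ [p.2]
      if p.1 < n - 1 then
        if pe.contains p.1 then parts1 ++ ["\n\n"] else parts1 ++ [" "]
      else parts1) [] l = l.flatMap (pvPieceA pe n) := by
  have hstep : (fun (parts : List String) (p : Int × String) =>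
      let parts1 := parts ++ [p.2]
      if p.1 < n - 1 then
        if pe.contains p.1 then parts1 ++ ["\n\n"] else parts1 ++ [" "]
      else parts1) = (fun parts p => parts ++ pvPieceA pe n p) := by
    funext parts p
    simp only [pvPieceA]
    split_ifs <;> simp
  rw [hstep, PySem.List.foldl_append_eq_flatMap]
  rfl

theorem pvA_flat_eq_spec (pe : List Int) (n : Int) :
    ∀ (l : List String) (i : Int), i + l.length = n →
    (((PySem.List.enumerate l i).flatMap (pvPieceA pe n)).map String.toList).flatten = pvSpec pe i l := by
  intro l
  induction l with
  | nil => intro i _; simp [PySem.List.enumerate, pvSpec]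
  | cons s r ih =>
    intro i hi
    rw [PySem.List.enumerate_cons]
    simp only [List.flatMap_cons, List.map_append, List.flatten_append]
    cases r with
    | nil =>
      have hlt : ¬ (i < n - 1) := by simp at hi; omega
      simp [pvPieceA, hlt, pvSpec, PySem.List.enumerate]
    | cons b t =>
      have hlt : i < n - 1 := by simp at hi; omega
      have := ih (i + 1) (by simp at hi ⊢; omega)
      rw [this]
      simp only [pvPieceA, hlt, if_true, pvSpec]
      split_ifs <;> simp

-- ===== B-side =====

def pvStepB (pe : List Int) (n : Int) (gc : List (List String) × List String) (p : Int × String) :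
    List (List String) × List String :=
  let current := gc.2 ++ [p.2]
  if p.1 < n - 1 ∧ pe.contains p.1 = true then (gc.1 ++ [current], ([] : List String))
  else (gc.1, current)

def pvClose (gc : List (List String) × List String) : List (List String) :=
  if gc.2 ≠ [] then gc.1 ++ [gc.2] else gc.1

theorem pvB_acc (pe : List Int) (n : Int) :
    ∀ (l : List (Int × String)) (groups : List (List String)) (cur : List String),
    pvClose (List.foldl (pvStepB pe n) (groups, cur) l) =
      groups ++ pvClose (List.foldl (pvStepB pe n) ([], cur) l) := by
  intro l
  induction l with
  | nil =>
    intro groups cur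
    simp only [List.foldl_nil, pvClose]
    split_ifs <;> simp
  | cons p t ih =>
    intro groups cur
    simp only [List.foldl_cons, pvStepB]
    split_ifs with h
    · simp only [List.nil_append]
      rw [ih (groups ++ [cur ++ [p.2]]) [], ih [cur ++ [p.2]] []]
      simp
    · exact ih groups (cur ++ [p.2])

def pvGrec (pe : List Int) (n : Int) (cur : List String) (i : Int) (l : List String) :
    List (List String) :=
  pvClose (List.foldl (pvStepB pe n) ([], cur) (PySem.List.enumerate l i))

theorem pvGrec_ne_nil (pe : List Int) (n : Int) :
    ∀ (l : List String) (cur : List String) (i : Int), l ≠ [] →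
    pvGrec pe n cur i l ≠ [] := by
  intro l
  induction l with
  | nil => intro cur i h; exact absurd rfl h
  | cons s r ih =>
    intro cur i _
    simp only [pvGrec, PySem.List.enumerate_cons, List.foldl_cons, pvStepB]
    split_ifs with h
    · simp only [List.nil_append]
      rw [pvB_acc pe n (PySem.List.enumerate r (i+1)) [cur ++ [s]] []]
      simp
    · cases r with
      | nil => simp [pvClose]
      | cons b t => exact ih (cur ++ [s]) (i + 1) (by simp)

def pvJoinSp (g : List String) : List Char := PySem.Chars.join [' '] (g.map String.toList)

theorem pvJoinSp_append_singleton (cur : List String) (s : String) (h : cur ≠ []) :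
    pvJoinSp (cur ++ [s]) = pvJoinSp cur ++ [' '] ++ s.toList := by
  simp only [pvJoinSp, List.map_append, List.map_cons, List.map_nil]
  exact pvJoin_append_singleton [' '] s.toList (cur.map String.toList) (by simpa using h)

theorem pvB_groups_eq_spec (pe : List Int) (n : Int) :
    ∀ (l : List String) (cur : List String) (i : Int), i + l.length = n →
    PySem.Chars.join ['\n', '\n'] ((pvGrec pe n cur i l).map pvJoinSp) =
      (if cur = [] then pvSpec pe i l
       else if l = [] then pvJoinSp cur
       else pvJoinSp cur ++ [' '] ++ pvSpec pe i l) := by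
  intro l
  induction l with
  | nil =>
    intro cur i _
    by_cases hc : cur = []
    · simp [pvGrec, pvClose, hc, pvSpec, PySem.List.enumerate, PySem.Chars.join_nil]
    · simp [pvGrec, pvClose, hc, PySem.List.enumerate, PySem.Chars.join_singleton]
  | cons s r ih =>
    intro cur i hi
    have hGrec : ∀ cur', pvGrec pe n cur' i (s :: r) =
        (if i < n - 1 ∧ pe.contains i = true
         then (cur' ++ [s]) :: pvGrec pe n [] (i + 1) r
         else pvGrec pe n (cur' ++ [s]) (i + 1) r) := by
      intro cur'
      simp only [pvGrec, PySem.List.enumerate_cons, List.foldl_cons]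
      rw [show pvStepB pe n ([], cur') (i, s) =
        (if i < n - 1 ∧ pe.contains i = true then ([cur' ++ [s]], ([] : List String))
         else ([], cur' ++ [s])) from by simp [pvStepB]]
      split_ifs with h
      · rw [pvB_acc pe n (PySem.List.enumerate r (i + 1)) [cur' ++ [s]] []]
        rfl
      · rfl
    by_cases h : i < n - 1 ∧ pe.contains i = true
    · -- paragraph boundary: the current group closes here
      rw [hGrec cur, if_pos h]
      have hm : i ∈ pe := by simpa using h.2
      have hr : r ≠ [] := by
        cases r with
        | nil => simp at hi; omega
        | cons b t => simp
      have hmapne : (pvGrec pe n [] (i + 1) r).map pvJoinSp ≠ [] := by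
        simp [pvGrec_ne_nil pe n r [] (i + 1) hr]
      rw [List.map_cons, pvJoin_cons_ne _ _ _ hmapne,
          ih [] (i + 1) (by simp at hi ⊢; omega)]
      cases r with
      | nil => exact absurd rfl hr
      | cons b t =>
        by_cases hc : cur = []
        · simp [hc, pvSpec, hm, pvJoinSp, PySem.Chars.join_singleton]
        · rw [pvJoinSp_append_singleton cur s hc]
          simp [hc, pvSpec, hm]
    · -- no boundary: keep accumulating into the current group
      rw [hGrec cur, if_neg h]
      rw [ih (cur ++ [s]) (i + 1) (by simp at hi ⊢; omega)]
      cases r with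
      | nil =>
        by_cases hc : cur = []
        · simp [hc, pvSpec, pvJoinSp, PySem.Chars.join_singleton]
        · rw [if_neg (by simp : ¬(cur ++ [s] = [])), if_pos rfl,
              pvJoinSp_append_singleton cur s hc]
          simp [hc, pvSpec]
      | cons b t =>
        have h1 : i < n - 1 := by simp at hi; omega
        have hm : i ∉ pe := by
          rcases not_and_or.mp h with h' | h'
          · exact absurd h1 h'
          · simpa using h'
        by_cases hc : cur = []
        · simp [hc, pvSpec, hm, pvJoinSp, PySem.Chars.join_singleton]
        · rw [if_neg (by simp : ¬(cur ++ [s] = []))]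
          rw [if_neg (by simp : ¬(b :: t = [])), pvJoinSp_append_singleton cur s hc]
          simp [hc, pvSpec, hm]

-- ===== VERDICT (by name: the statement is the Claim_ definition above) =====
theorem join_preserving_paragraphs_spec : Claim_equal_join_preserving_paragraphs := by
  intro sentences para_ends _
  unfold Spec_join_preserving_paragraphs
  rw [← String.toList_inj]
  unfold join_preserving_paragraphs join_preserving_paragraphs_alt
  simp only [PySem.Str.toList_join]
  rw [pvA_fold_eq_flatMap para_ends ((sentences.length : Int))]
  rw [show ("".toList : List Char) = [] from rfl]
  rw [pvJoin_nil_eq_flatten]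
  rw [pvA_flat_eq_spec para_ends (sentences.length : Int) sentences 0 (by simp)]
  rw [show ("\n\n".toList : List Char) = ['\n', '\n'] from rfl]
  have hmap : ∀ (gs : List (List String)),
      (gs.map (fun g => PySem.Str.join " " g)).map String.toList = gs.map pvJoinSp := by
    intro gs
    simp only [List.map_map]
    refine List.map_congr_left (fun g _ => ?_)
    simp only [Function.comp, PySem.Str.toList_join, pvJoinSp]
    rfl
  rw [hmap]
  have := pvB_groups_eq_spec para_ends (sentences.length : Int) sentences [] 0 (by simp)
  simp only at this
  exact (this ▸ rfl)
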